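-- pv_equiv track=rewrite | github.com/simafi/Simafi-Web | backend/core/module_access.py | modulo_desde_ruta
-- ===== SOURCE A (Python) =====
-- _PREFIXES = (
--     ('/catastro/', 'catastro'),
--     ('/tributario/', 'tributario'),
--     ('/administrativo/', 'administrativo'),
--     ('/compras/', 'compras'),
--     ('/contabilidad/', 'contabilidad'),
--     ('/tesoreria/', 'tesoreria'),
--     ('/presupuestos/', 'presupuestos'),
--     ('/configuracion/', 'configuracion'),
--     ('/servicios-publicos/', 'servicios-publicos'),
-- )
--
-- def modulo_desde_ruta(path):
--     """Devuelve el código de módulo si la ruta está protegida, o None."""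
--     if not path:
--         return None
--     if not path.startswith('/'):
--         path = '/' + path
--     for prefix, code in _PREFIXES:
--         if path.startswith(prefix):
--             return code
--     return None
-- ===== SOURCE B (Python) =====
-- _MODULES = frozenset((
--     'catastro', 'tributario', 'administrativo', 'compras', 'contabilidad',
--     'tesoreria', 'presupuestos', 'configuracion', 'servicios-publicos',
-- ))
--
-- def modulo_desde_ruta(path):
--     """Devuelve el código de módulo si la ruta está protegida, o None."""
--     if not path:
--         return None
--     if not path.startswith('/'):
--         path = '/' + path
--     end = path.find('/', 1)
--     if end == -1:
--         return None
--     code = path[1:end]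
--     return code if code in _MODULES else None
-- ===== Notes on version B (the rewrite author's own statement) =====
-- stated objective: alternative
-- what changed: Instead of scanning a tuple of nine '/code/' prefixes with startswith, B locates the second '/' with find, slices out the first path segment once, and tests membership in a frozenset of module codes.
import Mathlib
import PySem

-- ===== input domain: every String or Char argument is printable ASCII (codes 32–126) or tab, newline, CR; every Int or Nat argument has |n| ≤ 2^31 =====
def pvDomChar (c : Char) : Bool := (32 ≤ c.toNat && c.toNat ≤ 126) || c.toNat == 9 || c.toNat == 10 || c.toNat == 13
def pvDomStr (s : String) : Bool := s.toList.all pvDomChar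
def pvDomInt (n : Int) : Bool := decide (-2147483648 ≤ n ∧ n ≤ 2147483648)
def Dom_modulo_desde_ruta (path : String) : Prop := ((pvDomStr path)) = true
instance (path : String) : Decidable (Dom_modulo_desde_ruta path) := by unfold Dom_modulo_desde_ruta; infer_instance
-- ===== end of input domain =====

-- B replaces A's scan over nine '/code/' prefixes by one find of the second '/',
-- a slice of the first segment, and a set-membership test (alternative decomposition; return value only).


-- ===== PORT A =====
def pvPrefixes : List (String × String) :=
  [("/catastro/", "catastro"),
   ("/tributario/", "tributario"),
   ("/administrativo/", "administrativo"),
   ("/compras/", "compras"),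
   ("/contabilidad/", "contabilidad"),
   ("/tesoreria/", "tesoreria"),
   ("/presupuestos/", "presupuestos"),
   ("/configuracion/", "configuracion"),
   ("/servicios-publicos/", "servicios-publicos")]

-- the 'for prefix, code in _PREFIXES' loop with its early return
def pvLoopA : List (String × String) → String → Option String
  | [], _ => none
  | (pre, code) :: rest, p =>
      if PySem.Str.startswith p pre then some code else pvLoopA rest p

def modulo_desde_ruta (path : String) : Option String :=
  if path = "" then none
  else
    let path := if PySem.Str.startswith path "/" then path else "/" ++ path
    pvLoopA pvPrefixes path

-- ===== PORT B =====
-- the frozenset _MODULES (distinct elements, PySem set convention)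
def pvModules : List String :=
  ["catastro", "tributario", "administrativo", "compras", "contabilidad",
   "tesoreria", "presupuestos", "configuracion", "servicios-publicos"]

def modulo_desde_ruta_alt (path : String) : Option String :=
  if path = "" then none
  else
    let path := if PySem.Str.startswith path "/" then path else "/" ++ path
    let e := PySem.Str.findFrom path "/" 1 none
    if e = -1 then none
    else
      let code := PySem.Str.slice path (some 1) (some e)
      if pvModules.contains code then some code else none

-- ===== PRECONDITION & SPEC =====
def Spec_modulo_desde_ruta (path : String) (out : Option String) : Prop := out = modulo_desde_ruta_alt path
instance (path : String) (out : Option String) : Decidable (Spec_modulo_desde_ruta path out) := by unfold Spec_modulo_desde_ruta; infer_instance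

-- ===== CLAIM (what is proved, stated in full; the proofs are below) =====
def Claim_equal_modulo_desde_ruta : Prop := ∀ (path : String), Dom_modulo_desde_ruta path → Spec_modulo_desde_ruta path (modulo_desde_ruta path)

-- ===== LEMMAS AND PROOFS =====

theorem pvSingPrefix (a : Char) (xs : List Char) : [a] <+: xs ↔ ∃ t, xs = a :: t := by
  cases xs with
  | nil => simp
  | cons b t =>
    constructor
    · intro h; rw [List.cons_prefix_cons] at h; exact ⟨t, by rw [h.1]⟩
    · rintro ⟨t2, h2⟩; rw [h2]; exact ⟨t2, rfl⟩

theorem pvFindConcat (c t : List Char) (h : '/' ∉ c) :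
    PySem.Chars.find (c ++ '/'::t) ['/'] = (c.length : Int) := by
  have hin : (['/'] : List Char) <:+: (c ++ '/'::t) := ⟨c, t, by simp⟩
  have h0 : 0 ≤ PySem.Chars.find (c ++ '/'::t) ['/'] := (PySem.Chars.find_nonneg_iff _ _).mpr hin
  obtain ⟨hpre, hmin⟩ := PySem.Chars.find_spec h0
  set j := (PySem.Chars.find (c ++ '/'::t) ['/']).toNat with hj
  have h1 : j ≤ c.length := by
    by_contra h'
    rw [not_le] at h'
    exact hmin c.length h' (by rw [List.drop_left]; exact ⟨t, rfl⟩)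
  have h2 : ¬ j < c.length := by
    intro h'
    rw [List.drop_append_of_le_length (le_of_lt h')] at hpre
    rcases hd : List.drop j c with - | ⟨b, bs⟩
    · have hlen := congrArg List.length hd
      simp only [List.length_drop, List.length_nil] at hlen
      omega
    · rw [hd, List.cons_append, List.cons_prefix_cons] at hpre
      have hb : b ∈ c := List.mem_of_mem_drop (by rw [hd]; exact List.mem_cons_self ..)
      exact h (by rw [hpre.1]; exact hb)
  have : j = c.length := le_antisymm h1 (not_lt.mp h2)
  omega

theorem pvTakeSeg (r : List Char) (k : Nat) (hk : PySem.Chars.find r ['/'] = (k : Int)) :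
    ∃ t, r = r.take k ++ '/'::t := by
  have h0 : 0 ≤ PySem.Chars.find r ['/'] := by rw [hk]; positivity
  obtain ⟨hpre, -⟩ := PySem.Chars.find_spec h0
  rw [hk] at hpre
  simp only [Int.toNat_natCast] at hpre
  obtain ⟨t, ht⟩ := (pvSingPrefix _ _).mp hpre
  exact ⟨t, by rw [← ht, List.take_append_drop]⟩

theorem pvSeg (c r : List Char) (hc : '/' ∉ c) (k : Nat)
    (hk : PySem.Chars.find r ['/'] = (k : Int)) :
    (∃ t, r = c ++ '/'::t) ↔ r.take k = c := by
  constructor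
  · rintro ⟨t, rfl⟩
    have := pvFindConcat c t hc
    rw [hk] at this
    have hkc : k = c.length := by exact_mod_cast this
    subst hkc
    exact List.take_left ..
  · intro h
    obtain ⟨t, ht⟩ := pvTakeSeg r k hk
    exact ⟨t, by rw [ht, h]⟩

theorem pvNoSlash (c r : List Char) (hc : '/' ∉ c)
    (cf : PySem.Chars.find r ['/'] = -1) :
    PySem.Chars.startswith ('/'::r) ('/'::(c ++ ['/'])) = false := by
  rw [Bool.eq_false_iff]
  intro h
  rw [PySem.Chars.startswith_iff, List.cons_prefix_cons] at h
  obtain ⟨-, t, ht⟩ := h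
  have : r = c ++ '/'::t := by simpa using ht.symm
  rw [this, pvFindConcat c t hc] at cf
  omega

-- prefix check rewritten as the single test on the extracted segment
theorem pvStartA (c r : List Char) (hc : '/' ∉ c) (k : Nat)
    (hk : PySem.Chars.find r ['/'] = (k : Int)) :
    PySem.Chars.startswith ('/'::r) ('/'::(c ++ ['/'])) = decide (r.take k = c) := by
  by_cases h : r.take k = c
  · simp only [h, decide_true]
    obtain ⟨t, ht⟩ := (pvSeg c r hc k hk).mpr h
    rw [PySem.Chars.startswith_iff, List.cons_prefix_cons]
    exact ⟨rfl, ⟨t, by rw [ht]; simp⟩⟩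
  · simp only [h, decide_false]
    rw [Bool.eq_false_iff]
    intro hs
    rw [PySem.Chars.startswith_iff, List.cons_prefix_cons] at hs
    obtain ⟨-, t, ht⟩ := hs
    exact h ((pvSeg c r hc k hk).mp ⟨t, by simpa using ht.symm⟩)


-- core equality for a normalized path '/'::r, second '/' absent
theorem pvCoreNone (np : String) (r : List Char) (hr : np.toList = '/' :: r)
    (cf : PySem.Chars.find r ['/'] = -1) :
    pvLoopA pvPrefixes np = none := by
  have f_catastro : PySem.Str.startswith np "/catastro/" = false := by
    rw [PySem.Str.startswith_eq, hr]
    exact pvNoSlash ("catastro".toList) r (by decide) cf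
  have f_tributario : PySem.Str.startswith np "/tributario/" = false := by
    rw [PySem.Str.startswith_eq, hr]
    exact pvNoSlash ("tributario".toList) r (by decide) cf
  have f_administrativo : PySem.Str.startswith np "/administrativo/" = false := by
    rw [PySem.Str.startswith_eq, hr]
    exact pvNoSlash ("administrativo".toList) r (by decide) cf
  have f_compras : PySem.Str.startswith np "/compras/" = false := by
    rw [PySem.Str.startswith_eq, hr]
    exact pvNoSlash ("compras".toList) r (by decide) cf
  have f_contabilidad : PySem.Str.startswith np "/contabilidad/" = false := by
    rw [PySem.Str.startswith_eq, hr]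
    exact pvNoSlash ("contabilidad".toList) r (by decide) cf
  have f_tesoreria : PySem.Str.startswith np "/tesoreria/" = false := by
    rw [PySem.Str.startswith_eq, hr]
    exact pvNoSlash ("tesoreria".toList) r (by decide) cf
  have f_presupuestos : PySem.Str.startswith np "/presupuestos/" = false := by
    rw [PySem.Str.startswith_eq, hr]
    exact pvNoSlash ("presupuestos".toList) r (by decide) cf
  have f_configuracion : PySem.Str.startswith np "/configuracion/" = false := by
    rw [PySem.Str.startswith_eq, hr]
    exact pvNoSlash ("configuracion".toList) r (by decide) cf
  have f_servicios_publicos : PySem.Str.startswith np "/servicios-publicos/" = false := by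
    rw [PySem.Str.startswith_eq, hr]
    exact pvNoSlash ("servicios-publicos".toList) r (by decide) cf
  simp only [pvLoopA, pvPrefixes]
  rw [f_catastro, f_tributario, f_administrativo, f_compras, f_contabilidad, f_tesoreria, f_presupuestos, f_configuracion, f_servicios_publicos]
  simp

-- core equality for a normalized path '/'::r, second '/' at 1 + k
theorem pvCoreSome (np : String) (r : List Char) (hr : np.toList = '/' :: r) (k : Nat)
    (hk : PySem.Chars.find r ['/'] = (k : Int))
    (code : String) (hcode : code.toList = r.take k) :
    pvLoopA pvPrefixes np = (if pvModules.contains code then some code else none) := by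
  have s_catastro : PySem.Str.startswith np "/catastro/" = decide (r.take k = "catastro".toList) := by
    rw [PySem.Str.startswith_eq, hr]
    exact pvStartA ("catastro".toList) r (by decide) k hk
  have s_tributario : PySem.Str.startswith np "/tributario/" = decide (r.take k = "tributario".toList) := by
    rw [PySem.Str.startswith_eq, hr]
    exact pvStartA ("tributario".toList) r (by decide) k hk
  have s_administrativo : PySem.Str.startswith np "/administrativo/" = decide (r.take k = "administrativo".toList) := by
    rw [PySem.Str.startswith_eq, hr]
    exact pvStartA ("administrativo".toList) r (by decide) k hk
  have s_compras : PySem.Str.startswith np "/compras/" = decide (r.take k = "compras".toList) := by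
    rw [PySem.Str.startswith_eq, hr]
    exact pvStartA ("compras".toList) r (by decide) k hk
  have s_contabilidad : PySem.Str.startswith np "/contabilidad/" = decide (r.take k = "contabilidad".toList) := by
    rw [PySem.Str.startswith_eq, hr]
    exact pvStartA ("contabilidad".toList) r (by decide) k hk
  have s_tesoreria : PySem.Str.startswith np "/tesoreria/" = decide (r.take k = "tesoreria".toList) := by
    rw [PySem.Str.startswith_eq, hr]
    exact pvStartA ("tesoreria".toList) r (by decide) k hk
  have s_presupuestos : PySem.Str.startswith np "/presupuestos/" = decide (r.take k = "presupuestos".toList) := by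
    rw [PySem.Str.startswith_eq, hr]
    exact pvStartA ("presupuestos".toList) r (by decide) k hk
  have s_configuracion : PySem.Str.startswith np "/configuracion/" = decide (r.take k = "configuracion".toList) := by
    rw [PySem.Str.startswith_eq, hr]
    exact pvStartA ("configuracion".toList) r (by decide) k hk
  have s_servicios_publicos : PySem.Str.startswith np "/servicios-publicos/" = decide (r.take k = "servicios-publicos".toList) := by
    rw [PySem.Str.startswith_eq, hr]
    exact pvStartA ("servicios-publicos".toList) r (by decide) k hk
  have hbeq : ∀ (x : String), (code == x) = decide (r.take k = x.toList) := by
    intro x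
    have hiff : (code = x) ↔ (r.take k = x.toList) := by
      rw [← String.toList_inj, hcode]
    calc (code == x) = decide (code = x) := by by_cases h : code = x <;> simp [h]
    _ = decide (r.take k = x.toList) := decide_eq_decide.mpr hiff
  simp only [pvLoopA, pvPrefixes]
  rw [s_catastro, s_tributario, s_administrativo, s_compras, s_contabilidad, s_tesoreria, s_presupuestos, s_configuracion, s_servicios_publicos]
  simp only [pvModules, List.contains_cons, List.contains_nil, Bool.or_false]
  by_cases h_catastro : r.take k = ['c', 'a', 't', 'a', 's', 't', 'r', 'o']
  · have hcq : code = "catastro" := String.toList_inj.mp (show code.toList = "catastro".toList from hcode.trans h_catastro)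
    simp [h_catastro, hcq]
  by_cases h_tributario : r.take k = ['t', 'r', 'i', 'b', 'u', 't', 'a', 'r', 'i', 'o']
  · have hcq : code = "tributario" := String.toList_inj.mp (show code.toList = "tributario".toList from hcode.trans h_tributario)
    simp [h_tributario, hcq]
  by_cases h_administrativo : r.take k = ['a', 'd', 'm', 'i', 'n', 'i', 's', 't', 'r', 'a', 't', 'i', 'v', 'o']
  · have hcq : code = "administrativo" := String.toList_inj.mp (show code.toList = "administrativo".toList from hcode.trans h_administrativo)
    simp [h_administrativo, hcq]
  by_cases h_compras : r.take k = ['c', 'o', 'm', 'p', 'r', 'a', 's']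
  · have hcq : code = "compras" := String.toList_inj.mp (show code.toList = "compras".toList from hcode.trans h_compras)
    simp [h_compras, hcq]
  by_cases h_contabilidad : r.take k = ['c', 'o', 'n', 't', 'a', 'b', 'i', 'l', 'i', 'd', 'a', 'd']
  · have hcq : code = "contabilidad" := String.toList_inj.mp (show code.toList = "contabilidad".toList from hcode.trans h_contabilidad)
    simp [h_contabilidad, hcq]
  by_cases h_tesoreria : r.take k = ['t', 'e', 's', 'o', 'r', 'e', 'r', 'i', 'a']
  · have hcq : code = "tesoreria" := String.toList_inj.mp (show code.toList = "tesoreria".toList from hcode.trans h_tesoreria)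
    simp [h_tesoreria, hcq]
  by_cases h_presupuestos : r.take k = ['p', 'r', 'e', 's', 'u', 'p', 'u', 'e', 's', 't', 'o', 's']
  · have hcq : code = "presupuestos" := String.toList_inj.mp (show code.toList = "presupuestos".toList from hcode.trans h_presupuestos)
    simp [h_presupuestos, hcq]
  by_cases h_configuracion : r.take k = ['c', 'o', 'n', 'f', 'i', 'g', 'u', 'r', 'a', 'c', 'i', 'o', 'n']
  · have hcq : code = "configuracion" := String.toList_inj.mp (show code.toList = "configuracion".toList from hcode.trans h_configuracion)
    simp [h_configuracion, hcq]
  by_cases h_servicios_publicos : r.take k = ['s', 'e', 'r', 'v', 'i', 'c', 'i', 'o', 's', '-', 'p', 'u', 'b', 'l', 'i', 'c', 'o', 's']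
  · have hcq : code = "servicios-publicos" := String.toList_inj.mp (show code.toList = "servicios-publicos".toList from hcode.trans h_servicios_publicos)
    simp [h_servicios_publicos, hcq]
  simp [h_catastro, h_tributario, h_administrativo, h_compras, h_contabilidad, h_tesoreria, h_presupuestos, h_configuracion, h_servicios_publicos, hbeq]

-- ===== VERDICT (by name: the statement is the Claim_ definition above) =====
theorem modulo_desde_ruta_spec : Claim_equal_modulo_desde_ruta := by
  unfold Claim_equal_modulo_desde_ruta Spec_modulo_desde_ruta
  intro path _
  unfold modulo_desde_ruta modulo_desde_ruta_alt
  by_cases h0 : path = ""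
  · simp [h0]
  simp only [if_neg h0]
  set np := if PySem.Str.startswith path "/" then path else "/" ++ path with hnp
  obtain ⟨r, hr⟩ : ∃ r, np.toList = '/' :: r := by
    rw [hnp]
    by_cases hs : PySem.Str.startswith path "/" = true
    · rw [if_pos hs]
      rw [PySem.Str.startswith_eq] at hs
      have := (PySem.Chars.startswith_iff _ _).mp hs
      obtain ⟨t, ht⟩ := this
      exact ⟨path.toList.tail, by rw [← ht]; rfl⟩
    · rw [if_neg hs]
      exact ⟨path.toList, by simp⟩
  have hlen : 1 ≤ np.toList.length := by rw [hr]; simp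
  have hff : PySem.Str.findFrom np "/" 1 none =
      (if PySem.Chars.find r ['/'] = -1 then -1 else 1 + PySem.Chars.find r ['/']) := by
    rw [PySem.Str.findFrom_eq]
    have h1 : ((1 : Nat) : Int) = (1 : Int) := by norm_num
    rw [← h1, PySem.Chars.findFrom_natCast np.toList "/".toList 1 hlen]
    rw [hr]
    rfl
  by_cases cf : PySem.Chars.find r ['/'] = -1
  · rw [hff, if_pos cf, if_pos rfl]
    exact pvCoreNone np r hr cf
  · have hnn : 0 ≤ PySem.Chars.find r ['/'] := by
      have := PySem.Chars.neg_one_le_find r ['/']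
      omega
    set k := (PySem.Chars.find r ['/']).toNat with hkdef
    have hk : PySem.Chars.find r ['/'] = (k : Int) := (Int.toNat_of_nonneg hnn).symm
    have he : PySem.Str.findFrom np "/" 1 none = 1 + (k : Int) := by
      rw [hff, if_neg cf, hk]
    rw [he]
    rw [if_neg (show ¬(1 + (k : Int) = -1) by omega)]
    have hcode : (PySem.Str.slice np (some 1) (some (1 + (k : Int)))).toList = r.take k := by
      rw [PySem.Str.toList_slice, PySem.Chars.slice_eq_listSlice]
      have h1 : (1 : Int) = ((1 : Nat) : Int) := by norm_num
      rw [h1, PySem.List.slice_natCast_add np.toList 1 k, hr]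
      rfl
    exact pvCoreSome np r hr k hk _ hcode
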